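-- pv_equiv track=rewrite | github.com/WingiM/PygameMiniGames | SeaBattle.py | check_equal_coordinates
-- ===== SOURCE A (Python) =====
-- def check_equal_coordinates(arrangement) -> bool:  # Проверяет, нет ли "косых" кораблей
--     a, all_x = list(map(lambda w: w[0], arrangement)), True
--     b, all_y = list(map(lambda w: w[1], arrangement)), True
--     for i in a:
--         if a[0] != i:
--             all_x = False
--     for i in b:
--         if b[0] != i:
--             all_y = False
--     return any([all_x, all_y])
-- ===== SOURCE B (Python) =====
-- def check_equal_coordinates(arrangement) -> bool:
--     return len({w[0] for w in arrangement}) <= 1 or len({w[1] for w in arrangement}) <= 1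
-- ===== Notes on version B (the rewrite author's own statement) =====
-- stated objective: idiomatic
-- what changed: Replaces A's two compare-to-first scans with flag variables by set comprehensions over each coordinate: a ship is axis-aligned iff the set of distinct x's or of distinct y's has at most one element.
import Mathlib
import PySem

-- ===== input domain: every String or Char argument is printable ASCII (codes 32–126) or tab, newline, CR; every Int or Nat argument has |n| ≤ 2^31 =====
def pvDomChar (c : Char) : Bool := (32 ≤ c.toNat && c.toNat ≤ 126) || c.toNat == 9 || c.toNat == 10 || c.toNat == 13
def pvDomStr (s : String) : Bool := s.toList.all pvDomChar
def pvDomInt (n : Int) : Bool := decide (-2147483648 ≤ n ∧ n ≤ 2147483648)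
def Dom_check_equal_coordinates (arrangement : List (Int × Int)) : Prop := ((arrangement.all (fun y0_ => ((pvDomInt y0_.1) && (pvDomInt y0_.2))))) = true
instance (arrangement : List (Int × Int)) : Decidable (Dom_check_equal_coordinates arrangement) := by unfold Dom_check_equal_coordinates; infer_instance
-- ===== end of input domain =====

-- B replaces A's two compare-to-first flag scans by set comprehensions: axis-aligned iff the
-- distinct x's or the distinct y's number at most one (idiomatic; same cost).

-- ===== PORT A =====
def check_equal_coordinates (arrangement : List (Int × Int)) : Bool :=
  let a := arrangement.map (fun w => w.1)
  let b := arrangement.map (fun w => w.2)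
  let all_x : Bool := a.foldl (fun acc i => if PySem.List.pyGet? a (0:Int) ≠ (some i : Option Int) then false else acc) true
  let all_y : Bool := b.foldl (fun acc i => if PySem.List.pyGet? b (0:Int) ≠ (some i : Option Int) then false else acc) true
  [all_x, all_y].any id

-- ===== PORT B =====
def check_equal_coordinates_alt (arrangement : List (Int × Int)) : Bool :=
  decide ((PySem.Set.ofList (arrangement.map (fun w => w.1))).length ≤ 1) ||
  decide ((PySem.Set.ofList (arrangement.map (fun w => w.2))).length ≤ 1)

-- ===== PRECONDITION & SPEC =====
def Spec_check_equal_coordinates (arrangement : List (Int × Int)) (out : Bool) : Prop := out = check_equal_coordinates_alt arrangement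
instance (arrangement : List (Int × Int)) (out : Bool) : Decidable (Spec_check_equal_coordinates arrangement out) := by unfold Spec_check_equal_coordinates; infer_instance

-- ===== CLAIM (what is proved, stated in full; the proofs are below) =====
def Claim_equal_check_equal_coordinates : Prop := ∀ (arrangement : List (Int × Int)), Dom_check_equal_coordinates arrangement → Spec_check_equal_coordinates arrangement (check_equal_coordinates arrangement)

-- ===== LEMMAS AND PROOFS =====

theorem pv_foldl_and (p : Int → Bool) (l : List Int) (b : Bool) :
    l.foldl (fun acc i => if ¬ (p i = true) then false else acc) b = (b && l.all p) := by
  induction l generalizing b with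
  | nil => simp
  | cons h t ih =>
    simp only [List.foldl_cons, List.all_cons, ih]
    by_cases hp : p h = true <;> simp [hp]

theorem pv_foldl_add (h : Int) (t : List Int) :
    (∀ i ∈ t, i = h) → t.foldl PySem.Set.add [h] = [h] := by
  induction t with
  | nil => intro _; rfl
  | cons x xs ih =>
    intro hall
    have hx : x = h := hall x (by simp)
    subst hx
    rw [List.foldl_cons]
    have hadd : PySem.Set.add [x] x = [x] := by
      simp [PySem.Set.add, PySem.Set.contains]
    rw [hadd]
    exact ih (fun i hi => hall i (by simp [hi]))

theorem pv_set_singleton (h : Int) (t : List Int) (hall : ∀ i ∈ t, i = h) :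
    PySem.Set.ofList (h :: t) = [h] := by
  have base : PySem.Set.ofList (h :: t) = t.foldl PySem.Set.add [h] := by
    simp [PySem.Set.ofList_eq_foldl, List.foldl_cons, PySem.Set.add, PySem.Set.contains]
  rw [base]
  exact pv_foldl_add h t hall

theorem pv_key (l : List Int) :
    l.foldl (fun acc i => if PySem.List.pyGet? l (0:Int) ≠ some i then false else acc) true
      = decide ((PySem.Set.ofList l).length ≤ 1) := by
  cases l with
  | nil => simp [PySem.Set.ofList]
  | cons h t =>
    have hg : PySem.List.pyGet? (h :: t) (0:Int) = some h := by
      simp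
    simp only [hg]
    have lhs :
        (h :: t).foldl (fun acc i => if some h ≠ some i then false else acc) true
          = (h :: t).all (fun i => decide (h = i)) := by
      have := pv_foldl_and (fun i => decide (h = i)) (h :: t) true
      simpa using this
    rw [lhs]
    by_cases hall : ∀ i ∈ t, i = h
    · have h1 : PySem.Set.ofList (h :: t) = [h] := pv_set_singleton h t hall
      have h2 : (h :: t).all (fun i => decide (h = i)) = true := by
        simp only [List.all_eq_true]
        intro i hi
        rcases List.mem_cons.mp hi with rfl | hi'
        · simp
        · simp [hall i hi']
      rw [h1, h2]; simp
    · rw [not_forall] at hall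
      simp only [not_forall, exists_prop] at hall
      obtain ⟨i, hi, hne⟩ := hall
      have h2 : (h :: t).all (fun i => decide (h = i)) = false := by
        simp only [List.all_eq_false]
        exact ⟨i, by simp [hi], by simp [Ne.symm hne]⟩
      have h3 : ¬ (PySem.Set.ofList (h :: t)).length ≤ 1 := by
        intro hlen
        have hh : h ∈ PySem.Set.ofList (h :: t) := by
          rw [PySem.Set.mem_ofList]; simp
        have hii : i ∈ PySem.Set.ofList (h :: t) := by
          rw [PySem.Set.mem_ofList]; simp [hi]
        -- a list of length ≤ 1 has at most one element
        generalize hs : PySem.Set.ofList (h :: t) = s at hh hii hlen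
        match s, hh, hii, hlen with
        | [x], hh, hii, _ =>
          apply hne
          have e1 : i = x := by simpa using hii
          have e2 : h = x := by simpa using hh
          rw [e1, e2]
        | x :: y :: ys, _, _, hlen => simp at hlen
      rw [h2]; simp [h3]

-- ===== VERDICT (by name: the statement is the Claim_ definition above) =====
theorem check_equal_coordinates_spec : Claim_equal_check_equal_coordinates := by
  intro arrangement _
  unfold Spec_check_equal_coordinates
  show check_equal_coordinates arrangement = check_equal_coordinates_alt arrangement
  simp only [check_equal_coordinates, check_equal_coordinates_alt, List.any_cons,
    List.any_nil, id, Bool.or_false, pv_key]
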